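-- pv_equiv track=rewrite | github.com/jbeast21/AOC | 2021/12.py | checkSmallCave
-- ===== SOURCE A (Python) =====
-- from collections import Counter
--
-- def checkSmallCave(path):
--     count = Counter(path)
--     toPass = True
--     for i in count:
--         if i.islower():
--             if count[i] > 1:
--                 toPass = False
--     return(toPass)
-- ===== SOURCE B (Python) =====
-- def checkSmallCave(path):
--     s = sorted(path)
--     for a, b in zip(s, s[1:]):
--         if a == b and a.islower():
--             return False
--     return True
-- ===== Notes on version B (the rewrite author's own statement) =====
-- stated objective: alternative
-- what changed: Replaces the Counter hash-count plus key scan with sort-then-adjacent-scan: sort the path, then a single pass over adjacent pairs finds any repeated lowercase element (duplicates are adjacent after sorting), with no counting structure at all.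
import Mathlib
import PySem

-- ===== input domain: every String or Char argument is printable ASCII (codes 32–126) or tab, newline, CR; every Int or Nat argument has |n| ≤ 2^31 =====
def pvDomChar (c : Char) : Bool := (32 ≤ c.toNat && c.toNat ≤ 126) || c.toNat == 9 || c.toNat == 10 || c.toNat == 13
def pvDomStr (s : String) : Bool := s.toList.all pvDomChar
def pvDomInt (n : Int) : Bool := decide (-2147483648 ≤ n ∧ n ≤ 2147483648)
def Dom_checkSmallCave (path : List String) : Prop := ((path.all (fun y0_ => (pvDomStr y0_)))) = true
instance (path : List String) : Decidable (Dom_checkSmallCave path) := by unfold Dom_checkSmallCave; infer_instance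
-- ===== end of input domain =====

-- B replaces the Counter hash-count + key scan with sort-then-adjacent-scan (alternative algorithm, similar cost).

-- ===== PORT A =====
-- str.islower(): at least one lowercase letter and no uppercase letter (exact on the ASCII domain)
def pyStrIslower (s : String) : Bool :=
  s.toList.any PySem.Chars.islower && !(s.toList.any PySem.Chars.isupper)

def checkSmallCave (path : List String) : Bool :=
  let count := PySem.Dict.counter path
  count.keys.foldl (fun toPass i =>
    if pyStrIslower i then
      if count.getD i 0 > 1 then false else toPass
    else toPass) true

-- ===== PORT B =====
-- sorted(path); zip(s, s[1:]) is s.zip (s.drop 1) (s[1:] on a list = drop 1); the early-return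
-- loop over the pairs is the `any` below.
def checkSmallCave_alt (path : List String) : Bool :=
  let s := PySem.List.sorted path (fun x => x) false
  if (s.zip (s.drop 1)).any (fun p => p.1 == p.2 && pyStrIslower p.1) then false else true

-- ===== PRECONDITION & SPEC =====
def Spec_checkSmallCave (path : List String) (out : Bool) : Prop := out = checkSmallCave_alt path
instance (path : List String) (out : Bool) : Decidable (Spec_checkSmallCave path out) := by unfold Spec_checkSmallCave; infer_instance

-- ===== CLAIM (what is proved, stated in full; the proofs are below) =====
def Claim_equal_checkSmallCave : Prop := ∀ (path : List String), Dom_checkSmallCave path → Spec_checkSmallCave path (checkSmallCave path)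

-- ===== LEMMAS AND PROOFS =====

-- A's flag loop: starts b, becomes false iff some element satisfies the predicate
lemma pv_flag_foldl (p : String → Bool) (l : List String) (b : Bool) :
    l.foldl (fun t i => if p i then false else t) b = (b && !(l.any p)) := by
  induction l generalizing b with
  | nil => simp
  | cons x xs ih =>
      simp only [List.foldl_cons, List.any_cons, ih]
      cases p x <;> simp

-- adjacent-duplicate scan on a (≤)-sorted list finds exactly the elements of count ≥ 2
lemma pv_adj_iff (P : String → Bool) :
    ∀ (s : List String), s.Pairwise (· ≤ ·) →
      (((s.zip (s.drop 1)).any (fun p => p.1 == p.2 && P p.1)) = true ↔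
        ∃ x, P x = true ∧ 2 ≤ s.count x) := by
  intro s
  induction s with
  | nil => intro _; simp
  | cons a t ih =>
      intro hp
      cases t with
      | nil =>
          simp only [List.drop_succ_cons, List.drop_nil, List.zip_nil_right, List.any_nil]
          constructor
          · simp
          · rintro ⟨x, _, hc⟩
            simp only [List.count_cons, List.count_nil] at hc
            split at hc <;> omega
      | cons b r =>
          have hab : a ≤ b := (List.pairwise_cons.mp hp).1 b (by simp)
          have hale : ∀ y ∈ b :: r, a ≤ y := (List.pairwise_cons.mp hp).1
          have hble : ∀ y ∈ r, b ≤ y := (List.pairwise_cons.mp (List.pairwise_cons.mp hp).2).1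
          have htail := ih (List.pairwise_cons.mp hp).2
          simp only [List.drop_succ_cons, List.drop_zero, List.zip_cons_cons, List.any_cons,
            Bool.or_eq_true, Bool.and_eq_true, beq_iff_eq] at htail ⊢
          constructor
          · rintro (⟨hab2, hPa⟩ | hrest)
            · refine ⟨a, hPa, ?_⟩
              subst hab2
              simp
            · obtain ⟨x, hPx, hc⟩ := htail.mp hrest
              exact ⟨x, hPx, le_trans hc ((List.sublist_cons_self a (b :: r)).count_le x)⟩
          · rintro ⟨x, hPx, hc⟩
            by_cases hax : a = x
            · subst hax
              have hmem : a ∈ b :: r := by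
                have : 1 ≤ (b :: r).count a := by
                  simp [List.count_cons] at hc ⊢; omega
                exact List.one_le_count_iff.mp this
              by_cases hba : b = a
              · exact Or.inl ⟨hba.symm, hPx⟩
              · -- a ∈ r with a ≤ b ≤ a forces b = a, contradiction
                rcases List.mem_cons.mp hmem with h | h
                · exact absurd h.symm hba
                · have := hble a h
                  exact absurd (le_antisymm this hab) hba
            · refine Or.inr (htail.mpr ⟨x, hPx, ?_⟩)
              rw [List.count_cons] at hc
              simp [hax] at hc
              omega


-- ===== VERDICT (by name: the statement is the Claim_ definition above) =====

theorem checkSmallCave_spec : Claim_equal_checkSmallCave := by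
  intro path _
  unfold Spec_checkSmallCave checkSmallCave checkSmallCave_alt
  have hbody : (fun (toPass : Bool) (i : String) =>
      if pyStrIslower i then
        if (PySem.Dict.counter path).getD i 0 > 1 then false else toPass
      else toPass) =
      (fun t i => if (pyStrIslower i && decide ((PySem.Dict.counter path).getD i 0 > 1)) then false else t) := by
    funext t i
    by_cases h1 : pyStrIslower i = true <;>
      by_cases h2 : (PySem.Dict.counter path).getD i 0 > 1 <;>
        simp only [h1, h2, decide_true, decide_false, Bool.true_and, Bool.false_and,
          if_true, if_false] <;> rfl
  simp only [hbody, pv_flag_foldl, PySem.Dict.keys_counter, Bool.true_and]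
  set s := PySem.List.sorted path (fun x => x) false with hs
  have hperm : s.Perm path := PySem.List.sorted_perm path (fun x => x) false
  have hpair : s.Pairwise (· ≤ ·) := by simpa using PySem.List.sorted_pairwise path (fun x => x)
  have hadj := pv_adj_iff pyStrIslower s hpair
  have hA : ((PySem.Set.ofList path).any
      (fun i => pyStrIslower i && decide ((PySem.Dict.counter path).getD i 0 > 1))) =
      ((s.zip (s.drop 1)).any (fun p => p.1 == p.2 && pyStrIslower p.1)) := by
    rw [Bool.eq_iff_iff, hadj, List.any_eq_true]
    constructor
    · rintro ⟨x, hxm, hx⟩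
      simp only [Bool.and_eq_true, decide_eq_true_eq, PySem.Dict.getD_counter] at hx
      refine ⟨x, hx.1, ?_⟩
      rw [hperm.count_eq]
      omega
    · rintro ⟨x, hPx, hc⟩
      rw [hperm.count_eq] at hc
      refine ⟨x, (PySem.Set.mem_ofList _ _).mpr (List.one_le_count_iff.mp (by omega)), ?_⟩
      simp only [Bool.and_eq_true, decide_eq_true_eq, PySem.Dict.getD_counter]
      exact ⟨hPx, by omega⟩
  rw [hA]
  cases h : ((s.zip (s.drop 1)).any (fun p => p.1 == p.2 && pyStrIslower p.1)) <;> simp
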